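-- pv_equiv track=rewrite | github.com/jiwidi/AOC-2019 | day4/main.py | nextAsc
-- ===== SOURCE A (Python) =====
-- def nextAsc(i):
--     listIn = [int(n) for n in str(i)]
--     previous = listIn[0]
--     c=1
--     for n in listIn[1:]:
--         if(n<previous):
--             listIn = listIn[:c] + [previous for u in range(len(listIn)-c)]
--             break
--         else:
--             previous=n
--         c+=1
--     return int(''.join(map(str, listIn)))
-- ===== SOURCE B (Python) =====
-- def nextAsc(i):
--     def fix(ds):
--         if len(ds) <= 1:
--             return ds
--         rest = fix(ds[1:])
--         if ds[0] > rest[0]: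
--             return [ds[0]] * len(ds)
--         return [ds[0]] + rest
--     return int(''.join(map(str, fix([int(n) for n in str(i)]))))
-- ===== Notes on version B (the rewrite author's own statement) =====
-- stated objective: simpler
-- what changed: A scans left-to-right keeping previous/c state, breaks at the first descent and splices listIn[:c] with a flood of copies; B is a right-to-left structural recursion that fixes the tail first and floods only when the head exceeds the repaired tail's head, with no index bookkeeping or break.
import Mathlib
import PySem

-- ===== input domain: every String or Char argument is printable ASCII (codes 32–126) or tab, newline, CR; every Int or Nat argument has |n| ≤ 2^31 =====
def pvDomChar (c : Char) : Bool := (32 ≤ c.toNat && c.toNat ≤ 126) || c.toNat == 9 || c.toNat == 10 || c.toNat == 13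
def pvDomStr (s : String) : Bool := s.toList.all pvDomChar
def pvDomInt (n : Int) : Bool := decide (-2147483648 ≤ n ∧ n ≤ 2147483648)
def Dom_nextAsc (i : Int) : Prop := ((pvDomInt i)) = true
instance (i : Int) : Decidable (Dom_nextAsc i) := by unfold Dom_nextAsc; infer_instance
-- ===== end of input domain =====

-- B replaces A's left-to-right scan-to-first-descent with break and flood-fill by a
-- right-to-left structural recursion that repairs each descent as it returns (objective:
-- simpler — no index bookkeeping, no break).

-- ===== PORT A =====
-- the for-loop of A: state = (remaining listIn[1:], previous, c); listIn is only read until the break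
def nextAscLoop (rest : List Int) (previous : Int) (c : Int) (listIn : List Int) : List Int :=
  match rest with
  | [] => listIn
  | n :: t =>
    if n < previous then
      -- listIn[:c] + [previous for u in range(len(listIn)-c)]   (the break: loop result returned)
      PySem.List.slice listIn none (some c) ++
        (PySem.List.pyRange 0 ((listIn.length : Int) - c) 1).map (fun _ => previous)
    else nextAscLoop t n (c + 1) listIn

-- [int(n) for n in str(i)] ; int('-') raises ValueError (i < 0): excluded by Pre_, .getD 0 unreachable there
def nextAscDigits (i : Int) : List Int :=
  (PySem.Int.toChars i).map (fun ch => (PySem.Int.ofChars? [ch]).getD 0)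

def nextAsc (i : Int) : Int :=
  -- previous = listIn[0]  (str(i) is nonempty, IndexError impossible);
  -- int(''.join(map(str, listIn)))  (nonempty digit string on Pre_, so ofChars? is some)
  (PySem.Int.ofChars? (PySem.Chars.join []
    ((nextAscLoop (PySem.List.slice (nextAscDigits i) (some 1) none)
        ((PySem.List.pyGet? (nextAscDigits i) 0).getD 0) 1 (nextAscDigits i)).map
      PySem.Int.toChars))).getD 0

-- ===== PORT B =====
-- fix(ds): len(ds) <= 1 → ds; else recurse on ds[1:], flood on a descent at the head
def fixAsc : List Int → List Int
  | [] => []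
  | [d] => [d]
  | d :: e :: t =>
    let rest := fixAsc (e :: t)
    if d > (PySem.List.pyGet? rest 0).getD 0 then
      PySem.List.pyRepeat [d] ((d :: e :: t).length : Int)   -- [ds[0]] * len(ds)
    else d :: rest

-- [int(n) for n in str(i)]  (same comprehension as in A's Python; ValueError for i < 0 is outside Pre_)
def nextAscAltDigits (i : Int) : List Int :=
  (PySem.Int.toChars i).map (fun ch => (PySem.Int.ofChars? [ch]).getD 0)

def nextAsc_alt (i : Int) : Int :=
  (PySem.Int.ofChars? (PySem.Chars.join []
    ((fixAsc (nextAscAltDigits i)).map PySem.Int.toChars))).getD 0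

-- ===== PRECONDITION & SPEC =====
-- Pre_ excludes i < 0, where the Python A (and B alike) raises ValueError: str(i) starts with '-'
-- and int('-') fails.
def Pre_nextAsc (i : Int) : Prop := 0 ≤ i
instance (i : Int) : Decidable (Pre_nextAsc i) := by unfold Pre_nextAsc; infer_instance
def pvWitness_nextAsc : Int := 1320

def Spec_nextAsc (i : Int) (out : Int) : Prop := out = nextAsc_alt i
instance (i : Int) (out : Int) : Decidable (Spec_nextAsc i out) := by unfold Spec_nextAsc; infer_instance

-- ===== CLAIM (what is proved, stated in full; the proofs are below) =====
def Claim_equal_nextAsc : Prop := ∀ (i : Int), Dom_nextAsc i → Pre_nextAsc i → Spec_nextAsc i (nextAsc i)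

-- ===== LEMMAS AND PROOFS =====

-- fixAsc keeps the head of a nonempty list
lemma fixAsc_head (n : Int) (t : List Int) :
    (PySem.List.pyGet? (fixAsc (n :: t)) 0).getD 0 = n := by
  cases t with
  | nil => simp [fixAsc]
  | cons e t' =>
    show (PySem.List.pyGet?
      (if n > (PySem.List.pyGet? (fixAsc (e :: t')) 0).getD 0 then
        PySem.List.pyRepeat [n] ((n :: e :: t').length : Int)
       else n :: fixAsc (e :: t')) 0).getD 0 = n
    split
    · rw [PySem.List.pyRepeat_singleton]
      have h2 : (((n :: e :: t').length : Int)).toNat = t'.length + 2 := by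
        simp only [List.length_cons]; omega
      rw [h2, List.replicate_succ]
      simp [PySem.List.pyGet?_zero_cons]
    · simp

-- A's loop, started after a non-decreasing prefix `pre`, computes `pre ++` B's repair
lemma nextAscLoop_eq_fixAsc (tail : List Int) : ∀ (prev : Int) (pre : List Int),
    nextAscLoop tail prev ((pre.length : Int) + 1) (pre ++ prev :: tail)
      = pre ++ fixAsc (prev :: tail) := by
  induction tail with
  | nil => intro prev pre; simp [nextAscLoop, fixAsc]
  | cons n t ih =>
    intro prev pre
    show (if n < prev then
        PySem.List.slice (pre ++ prev :: n :: t) none (some ((pre.length : Int) + 1)) ++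
          (PySem.List.pyRange 0 (((pre ++ prev :: n :: t).length : Int) - ((pre.length : Int) + 1)) 1).map
            (fun _ => prev)
      else nextAscLoop t n ((pre.length : Int) + 1 + 1) (pre ++ prev :: n :: t))
      = pre ++ fixAsc (prev :: n :: t)
    have hfix : fixAsc (prev :: n :: t)
        = if prev > n then PySem.List.pyRepeat [prev] (((prev :: n :: t).length : Int))
          else prev :: fixAsc (n :: t) := by
      show (if prev > (PySem.List.pyGet? (fixAsc (n :: t)) 0).getD 0 then
              PySem.List.pyRepeat [prev] (((prev :: n :: t).length : Int))
            else prev :: fixAsc (n :: t)) = _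
      rw [fixAsc_head]
    rw [hfix]
    by_cases h : n < prev
    · simp only [if_pos h]
      have hlen : (((pre ++ prev :: n :: t).length : Int) - ((pre.length : Int) + 1))
          = ((t.length + 1 : Nat) : Int) := by
        simp only [List.length_append, List.length_cons]; omega
      have hc : ((pre.length : Int) + 1) = ((pre.length + 1 : Nat) : Int) := by push_cast; ring
      rw [hlen, PySem.List.pyRange_zero_natCast, hc, PySem.List.slice_to_natCast]
      have htake : (pre ++ prev :: n :: t).take (pre.length + 1) = pre ++ [prev] := by
        have he : pre ++ prev :: n :: t = (pre ++ [prev]) ++ n :: t := by simp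
        rw [he]
        have hl : (pre ++ [prev]).length = pre.length + 1 := by simp
        rw [← hl, List.take_left]
      rw [htake, PySem.List.pyRepeat_singleton]
      have hnat : (((prev :: n :: t).length : Int)).toNat = t.length + 2 := by
        simp only [List.length_cons]; omega
      rw [hnat, List.replicate_succ]
      simp [Function.comp_def, List.map_const']
    · simp only [if_neg h]
      have h1 : ((pre.length : Int) + 1 + 1) = (((pre ++ [prev]).length : Int) + 1) := by simp
      have h2 : pre ++ prev :: n :: t = (pre ++ [prev]) ++ n :: t := by simp
      rw [h1, h2, ih n (pre ++ [prev])]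
      simp

-- on any digit list, A's loop equals B's repair
lemma loop_eq_fix (d : List Int) :
    nextAscLoop (PySem.List.slice d (some 1) none) ((PySem.List.pyGet? d 0).getD 0) 1 d
      = fixAsc d := by
  cases d with
  | nil => simp [nextAscLoop, fixAsc, PySem.List.slice]
  | cons p tl =>
    rw [PySem.List.slice_from_one]
    show nextAscLoop tl ((PySem.List.pyGet? (p :: tl) 0).getD 0) 1 (p :: tl) = fixAsc (p :: tl)
    rw [PySem.List.pyGet?_zero_cons]
    have := nextAscLoop_eq_fixAsc tl p []
    simpa using this

-- the two ports build the same digit list, repair it the same way, and join it the same way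
lemma nextAsc_eq_alt (i : Int) : nextAsc i = nextAsc_alt i := by
  unfold nextAsc nextAsc_alt
  rw [show nextAscAltDigits i = nextAscDigits i from rfl, loop_eq_fix]

-- ===== VERDICT (by name: the statement is the Claim_ definition above) =====
theorem nextAsc_spec : Claim_equal_nextAsc := by
  intro i _ _
  exact nextAsc_eq_alt i
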